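-- pv_equiv track=rewrite | github.com/Park-Young-Hun/Algorithm | Python/BaekJoon/비슷한단어_2607.py | solution
-- ===== SOURCE A (Python) =====
-- from collections import defaultdict
--
-- def is_similar(target, word):
--     answer = 0
--     chr_cnts = defaultdict(int)
--
--     for char in target:
--         chr_cnts[char] += 1
--
--     for char in word:
--         if chr_cnts[char] > 0:
--             chr_cnts[char] -= 1
--
--     if sum(chr_cnts.values()) == 1 or sum(chr_cnts.values()) == 0:
--         answer += 1
--
--     return answer
--
-- def solution(n, words):
--     answer = 0
--     target = words.pop(0)
--     s = len(target)
--
--     for word in words: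
--         if len(word) == s:
--             answer += is_similar(target, word)
--         elif len(word) == s-1:
--             answer += is_similar(target, word)
--         elif len(word) == s+1:
--             answer += is_similar(word, target)
--     return answer
-- ===== SOURCE B (Python) =====
-- def solution(n, words):
--     target = words.pop(0)
--     t = sorted(target)
--     total = 0
--     for word in words:
--         if abs(len(word) - len(t)) <= 1:
--             w = sorted(word)
--             # two-pointer merge over the two sorted character lists:
--             # inter = size of the multiset intersection of the two words
--             i = j = inter = 0
--             while i < len(t) and j < len(w):
--                 if t[i] == w[j]:
--                     inter += 1
--                     i += 1
--                     j += 1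
--                 elif t[i] < w[j]:
--                     i += 1
--                 else:
--                     j += 1
--             # similar iff the longer word has at most one unmatched letter
--             if max(len(t), len(w)) - inter <= 1:
--                 total += 1
--     return total
-- ===== Notes on version B (the rewrite author's own statement) =====
-- stated objective: alternative
-- what changed: B replaces A's per-pair dict counting/decrement loops and three-branch length dispatch by a sort-then-two-pointer merge: each word's characters are sorted and a two-pointer scan over the two sorted lists computes the multiset-intersection size, and the pair is similar iff max(len)-intersection <= 1.
import Mathlib
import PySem

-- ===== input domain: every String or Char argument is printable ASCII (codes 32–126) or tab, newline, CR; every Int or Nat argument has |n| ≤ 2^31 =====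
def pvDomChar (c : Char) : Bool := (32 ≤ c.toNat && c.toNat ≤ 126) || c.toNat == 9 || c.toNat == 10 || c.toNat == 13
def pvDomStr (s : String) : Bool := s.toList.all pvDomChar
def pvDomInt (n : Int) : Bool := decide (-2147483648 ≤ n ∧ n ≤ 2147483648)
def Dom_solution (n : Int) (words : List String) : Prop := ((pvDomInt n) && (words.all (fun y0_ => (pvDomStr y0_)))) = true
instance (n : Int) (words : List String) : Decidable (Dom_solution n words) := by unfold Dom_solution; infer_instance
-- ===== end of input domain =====

-- B replaces A's per-pair dict count/decrement loops and three-branch length dispatch by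
-- sort-then-two-pointer merge: similar iff max(len) - multiset-intersection size <= 1
-- (objective: alternative algorithm, same asymptotic cost up to sorting).
-- Note: like A, B pops the first element of `words` (a caller-visible mutation); the
-- equivalence proved here is about the return value.


-- ===== PORT A =====
-- is_similar(target, word): count target's chars in a defaultdict(int), walk word decrementing
-- positive counts (a defaultdict read inserts the default 0: modelled by setdefault), then test
-- whether the leftover sum is 1 or 0.
def isSimilar (target word : String) : Int :=
  let cnts : PySem.Dict Char Int :=
    target.toList.foldl (fun d c => d.insert c (d.getD c 0 + 1)) (PySem.Dict.mk [])
  let cnts : PySem.Dict Char Int :=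
    word.toList.foldl
      (fun d c =>
        let d := d.setdefault c 0
        if d.getD c 0 > 0 then d.insert c (d.getD c 0 - 1) else d) cnts
  if cnts.values.sum = 1 ∨ cnts.values.sum = 0 then 0 + 1 else 0

def solution (n : Int) (words : List String) : Int :=
  match PySem.List.pop? words 0 with
  | none => 0  -- unreachable under Pre_solution: Python's words.pop(0) raises IndexError
  | some (target, rest) =>
    let s := PySem.Str.len target
    rest.foldl (fun answer word =>
      if PySem.Str.len word = s then answer + isSimilar target word
      else if PySem.Str.len word = s - 1 then answer + isSimilar target word
      else if PySem.Str.len word = s + 1 then answer + isSimilar word target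
      else answer) 0

-- ===== PORT B =====
-- the two-pointer while loop over the two sorted character lists, as structural recursion
-- advancing the pointer(s) exactly as the Python does
def merge2 : List Char → List Char → Int
  | [], _ => 0
  | _ :: _, [] => 0
  | a :: s, b :: t =>
    if a = b then merge2 s t + 1
    else if a < b then merge2 s (b :: t)
    else merge2 (a :: s) t
termination_by s t => s.length + t.length

def solution_alt (n : Int) (words : List String) : Int :=
  match PySem.List.pop? words 0 with
  | none => 0  -- unreachable under Pre_solution: pop(0) raises IndexError
  | some (target, rest) =>
    let t := PySem.List.sorted target.toList (fun c => c) false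
    rest.foldl (fun total word =>
      if |PySem.Str.len word - (t.length : Int)| ≤ 1 then
        let w := PySem.List.sorted word.toList (fun c => c) false
        if max (t.length : Int) (w.length : Int) - merge2 t w ≤ 1 then total + 1 else total
      else total) 0

-- ===== PRECONDITION & SPEC =====
-- Pre_ excludes only the empty list, on which Python's words.pop(0) raises IndexError (in A and in B).
def Pre_solution (n : Int) (words : List String) : Prop := words ≠ []
instance (n : Int) (words : List String) : Decidable (Pre_solution n words) := by unfold Pre_solution; infer_instance
def pvWitness_solution : Int × List String := (3, ["abc", "bca", "abd"])

def Spec_solution (n : Int) (words : List String) (out : Int) : Prop := out = solution_alt n words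
instance (n : Int) (words : List String) (out : Int) : Decidable (Spec_solution n words out) := by unfold Spec_solution; infer_instance

-- ===== CLAIM (what is proved, stated in full; the proofs are below) =====
def Claim_equal_solution : Prop := ∀ (n : Int) (words : List String), Dom_solution n words → Pre_solution n words → Spec_solution n words (solution n words)

-- ===== LEMMAS AND PROOFS =====

-- A's decrement step on one character of `word` (the lambda inside isSimilar, zeta-expanded).
def decStep (d : PySem.Dict Char Int) (c : Char) : PySem.Dict Char Int :=
  if (d.setdefault c 0).getD c 0 > 0
  then (d.setdefault c 0).insert c ((d.setdefault c 0).getD c 0 - 1)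
  else d.setdefault c 0

lemma getD_setdefault_zero (d : PySem.Dict Char Int) (c k : Char) :
    (d.setdefault c 0).getD k 0 = d.getD k 0 := by
  by_cases h : d.contains c = true
  · rw [PySem.Dict.setdefault_of_contains d 0 h]
  · rw [PySem.Dict.setdefault_of_not_contains d 0 (by simpa using h), PySem.Dict.getD_insert]
    split_ifs with hk
    · subst hk; rw [PySem.Dict.getD_of_not_contains d 0 (by simpa using h)]
    · rfl

lemma getD_decStep (d : PySem.Dict Char Int) (c k : Char) :
    (decStep d c).getD k 0 =
      if k = c then (if 0 < d.getD c 0 then d.getD c 0 - 1 else d.getD c 0) else d.getD k 0 := by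
  unfold decStep
  simp only [getD_setdefault_zero, gt_iff_lt]
  by_cases h : 0 < d.getD c 0
  · rw [if_pos h, PySem.Dict.getD_insert]
    split_ifs with hk <;> simp [hk, getD_setdefault_zero]
  · rw [if_neg h]
    split_ifs with hk <;> simp [hk, getD_setdefault_zero]

lemma keys_decStep (d : PySem.Dict Char Int) (c : Char) :
    (decStep d c).keys = PySem.Set.add d.keys c := by
  unfold decStep
  by_cases h : d.contains c = true
  · rw [PySem.Dict.setdefault_of_contains d 0 h]
    have hadd : PySem.Set.add d.keys c = d.keys := by
      simp [PySem.Set.add, PySem.Set.contains,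
        (PySem.Dict.contains_iff_mem_keys d c).mp h]
    rw [hadd]
    split_ifs with hpos
    · exact PySem.Dict.keys_insert_of_contains d _ h
    · rfl
  · have h' : d.contains c = false := by simpa using h
    rw [PySem.Dict.setdefault_of_not_contains d 0 h']
    have hc0 : (d.insert c 0).getD c 0 = 0 := by
      rw [PySem.Dict.getD_insert]; simp
    rw [if_neg (by rw [hc0]; omega)]
    have hmem : c ∉ d.keys := fun hm => by
      simp [(PySem.Dict.contains_iff_mem_keys d c).mpr hm] at h'
    rw [PySem.Dict.keys_insert_of_not_contains d 0 h']
    simp [PySem.Set.add, PySem.Set.contains, hmem]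

lemma getD_foldl_decStep (W : List Char) (d : PySem.Dict Char Int)
    (h : ∀ k, 0 ≤ d.getD k 0) (k : Char) :
    (W.foldl decStep d).getD k 0 = max (d.getD k 0 - W.count k) 0 := by
  induction W generalizing d with
  | nil => simpa using (max_eq_left (h k)).symm
  | cons c W ih =>
    rw [List.foldl_cons, ih (decStep d c)
      (fun j => by rw [getD_decStep]; have := h j; have := h c; split_ifs <;> omega)]
    rw [getD_decStep]
    have hk := h k; have hc := h c
    simp only [List.count_cons, beq_iff_eq]
    by_cases hkc : k = c
    · subst hkc
      simp only [if_pos rfl]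
      push_cast
      simp only [Int.max_def]
      split_ifs <;> omega
    · simp only [if_neg hkc, if_neg (fun h : c = k => hkc h.symm), add_zero]

lemma keys_foldl_decStep (W : List Char) (d : PySem.Dict Char Int) :
    (W.foldl decStep d).keys = PySem.Set.update d.keys W := by
  induction W generalizing d with
  | nil => simp [PySem.Set.update]
  | cons c W ih =>
    rw [List.foldl_cons, ih, keys_decStep]
    simp [PySem.Set.update]

lemma update_split (W : List Char) (s : PySem.Set Char) :
    ∃ ext : List Char, PySem.Set.update s W = s ++ ext ∧ (∀ x ∈ ext, x ∉ s) ∧ ext.Nodup := by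
  induction W generalizing s with
  | nil => exact ⟨[], by simp [PySem.Set.update]⟩
  | cons c W ih =>
    have hstep : PySem.Set.update s (c :: W) = PySem.Set.update (PySem.Set.add s c) W := by
      simp [PySem.Set.update]
    by_cases hc : c ∈ s
    · have hadd : PySem.Set.add s c = s := by simp [PySem.Set.add, PySem.Set.contains, hc]
      rw [hstep, hadd]; exact ih s
    · have hadd : PySem.Set.add s c = s ++ [c] := by simp [PySem.Set.add, PySem.Set.contains, hc]
      obtain ⟨ext, heq, hnotin, hnd⟩ := ih (s ++ [c])
      refine ⟨c :: ext, ?_, ?_, ?_⟩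
      · rw [hstep, hadd, heq]; simp
      · intro x hx
        rcases List.mem_cons.mp hx with rfl | hx
        · exact hc
        · exact fun hs => hnotin x hx (by simp [hs])
      · exact List.nodup_cons.mpr ⟨fun hm => hnotin c hm (by simp), hnd⟩

lemma counter_nonneg (T : List Char) : ∀ k, 0 ≤ (PySem.Dict.counter T).getD k 0 := fun k => by
  rw [PySem.Dict.getD_counter]; positivity

-- A's leftover sum is the multiset-difference sum over the distinct characters of T.
lemma simSum (T W : List Char) :
    (W.foldl decStep (PySem.Dict.counter T)).values.sum
      = ((PySem.Set.ofList T).map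
          (fun k => max ((List.count k T : Int) - (List.count k W : Int)) 0)).sum := by
  obtain ⟨ext, heq, hdisj, hndext⟩ := update_split W (PySem.Set.ofList T)
  have hnd : (W.foldl decStep (PySem.Dict.counter T)).keys.Nodup := by
    rw [keys_foldl_decStep, PySem.Dict.keys_counter, heq]
    exact List.nodup_append.mpr ⟨PySem.Set.nodup_ofList T, hndext,
      fun x hx y hy => fun hxy => hdisj y hy (hxy ▸ hx)⟩
  rw [PySem.Dict.values_eq_map_keys _ hnd 0, keys_foldl_decStep, PySem.Dict.keys_counter, heq,
    List.map_append, List.sum_append]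
  have h1 : ∀ k, (W.foldl decStep (PySem.Dict.counter T)).getD k 0
      = max ((List.count k T : Int) - (List.count k W : Int)) 0 := fun k => by
    rw [getD_foldl_decStep W _ (counter_nonneg T), PySem.Dict.getD_counter]
  have hext : (ext.map (fun k => (W.foldl decStep (PySem.Dict.counter T)).getD k 0)).sum = 0 := by
    apply List.sum_eq_zero
    intro x hx
    obtain ⟨k, hk, rfl⟩ := List.mem_map.mp hx
    rw [h1 k]
    have : k ∉ T := fun hmem => hdisj k hk ((PySem.Set.mem_ofList T k).mpr hmem)
    rw [List.count_eq_zero.mpr this]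
    simp
  rw [hext, add_zero]
  exact congrArg List.sum (List.map_congr_left (fun k _ => h1 k))

-- size of the multiset intersection of two character lists
def interM (T W : List Char) : Int := (((T : Multiset Char)) ∩ (W : Multiset Char)).card

lemma interM_comm (T W : List Char) : interM T W = interM W T := by
  unfold interM; rw [Multiset.inter_comm]

lemma interM_le_left (T W : List Char) : interM T W ≤ (T.length : Int) := by
  unfold interM
  have h : ((T : Multiset Char) ∩ (W : Multiset Char)).card ≤ (T : Multiset Char).card :=
    Multiset.card_le_card Multiset.inter_le_left
  simpa using Int.ofNat_le.mpr h

-- the two-pointer merge over sorted lists computes the multiset-intersection size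
lemma merge2_eq_interM : ∀ (s t : List Char), s.Pairwise (· ≤ ·) → t.Pairwise (· ≤ ·) →
    merge2 s t = interM s t := by
  intro s t
  induction hn : s.length + t.length using Nat.strong_induction_on generalizing s t with
  | _ n ih =>
    subst hn
    match s, t with
    | [], t => intro _ _; simp [merge2, interM]
    | a :: s, [] => intro _ _; simp [merge2, interM]
    | a :: s, b :: t =>
      intro hs ht
      obtain ⟨hsa, hs'⟩ := List.pairwise_cons.mp hs
      obtain ⟨htb, ht'⟩ := List.pairwise_cons.mp ht
      rw [merge2]
      split_ifs with hab halt
      · subst hab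
        rw [ih (s.length + t.length) (by simp; omega) s t rfl hs' ht']
        unfold interM
        have hms : ((a :: s : List Char) : Multiset Char) ∩ ((a :: t : List Char) : Multiset Char)
            = a ::ₘ (((s : List Char) : Multiset Char) ∩ ((t : List Char) : Multiset Char)) := by
          ext k
          rw [← Multiset.cons_coe, ← Multiset.cons_coe]
          simp only [Multiset.count_inter, Multiset.count_cons]
          by_cases hk : k = a <;> simp [hk] <;> omega
        rw [hms]
        simp
      · -- a < b : a is strictly below every element of b :: t, so it never matches
        rw [ih (s.length + (b :: t).length) (by simp) s (b :: t) rfl hs' ht]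
        unfold interM
        have hnot : a ∉ (b :: t) := by
          intro hmem
          rcases List.mem_cons.mp hmem with rfl | hmem
          · exact hab rfl
          · exact absurd (htb a hmem) (not_le.mpr halt)
        have hms : ((a :: s : List Char) : Multiset Char) ∩ ((b :: t : List Char) : Multiset Char)
            = ((s : List Char) : Multiset Char) ∩ ((b :: t : List Char) : Multiset Char) := by
          ext k
          rw [← Multiset.cons_coe]
          simp only [Multiset.count_inter, Multiset.count_cons, Multiset.coe_count]
          by_cases hk : k = a
          · subst hk
            rw [List.count_eq_zero.mpr hnot]
            simp
          · simp [hk]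
        rw [hms]
      · -- b < a : b never matches any element of a :: s
        have hba : b < a := by
          rcases lt_trichotomy a b with h | h | h
          · exact absurd h halt
          · exact absurd h hab
          · exact h
        rw [ih ((a :: s).length + t.length) (by simp) (a :: s) t rfl hs ht']
        unfold interM
        have hnot : b ∉ (a :: s) := by
          intro hmem
          rcases List.mem_cons.mp hmem with rfl | hmem
          · exact absurd rfl (ne_of_lt hba)
          · exact absurd (hsa b hmem) (not_le.mpr hba)
        have hms : ((a :: s : List Char) : Multiset Char) ∩ ((b :: t : List Char) : Multiset Char)
            = ((a :: s : List Char) : Multiset Char) ∩ ((t : List Char) : Multiset Char) := by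
          ext k
          rw [show ((b :: t : List Char) : Multiset Char) = b ::ₘ (t : Multiset Char) from
            (Multiset.cons_coe b t).symm]
          simp only [Multiset.count_inter, Multiset.count_cons, Multiset.coe_count]
          by_cases hk : k = b
          · subst hk
            rw [List.count_eq_zero.mpr hnot]
            simp
          · simp [hk]
        rw [hms]

-- A's leftover sum equals len T minus the multiset-intersection size
lemma sum_max_eq (T W : List Char) :
    ((PySem.Set.ofList T).map
        (fun k => max ((List.count k T : Int) - (List.count k W : Int)) 0)).sum
      = (T.length : Int) - interM T W := by
  classical
  have hnd := PySem.Set.nodup_ofList T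
  have hmax : ∀ k : Char,
      max ((List.count k T : Int) - (List.count k W : Int)) 0
        = (List.count k T : Int) - min (List.count k T : Int) (List.count k W : Int) := by
    intro k; rcases le_total (List.count k T : Int) (List.count k W : Int) with h | h <;>
      simp [max_def, min_def] <;> omega
  have hsplit : ((PySem.Set.ofList T).map
      (fun k => max ((List.count k T : Int) - (List.count k W : Int)) 0)).sum
      = ((PySem.Set.ofList T).map (fun k => (List.count k T : Int))).sum
        - ((PySem.Set.ofList T).map
            (fun k => min (List.count k T : Int) (List.count k W : Int))).sum := by
    rw [show ∀ (L : List Char) (f g : Char → Int),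
        (L.map f).sum - (L.map g).sum = (L.map (fun k => f k - g k)).sum from
      fun L f g => by induction L with
        | nil => simp
        | cons x L ih => simp [← ih]; ring]
    exact congrArg List.sum (List.map_congr_left (fun k _ => hmax k))
  rw [hsplit]
  -- convert both list sums over the nodup list to Finset sums over T.toFinset
  have htofin : (PySem.Set.ofList T).toFinset = T.toFinset := by
    ext k; simp [List.mem_toFinset, PySem.Set.mem_ofList]
  have hsum1 : ((PySem.Set.ofList T).map (fun k => (List.count k T : Int))).sum
      = ∑ k ∈ T.toFinset, (List.count k T : Int) := by
    rw [← htofin, List.sum_toFinset _ hnd]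
  have hsum2 : ((PySem.Set.ofList T).map
      (fun k => min (List.count k T : Int) (List.count k W : Int))).sum
      = ∑ k ∈ T.toFinset, min (List.count k T : Int) (List.count k W : Int) := by
    rw [← htofin, List.sum_toFinset _ hnd]
  rw [hsum1, hsum2]
  have hlen : ∑ k ∈ T.toFinset, (List.count k T : Int) = (T.length : Int) := by
    have := Multiset.toFinset_sum_count_eq (s := (T : Multiset Char))
    have h2 : ∑ k ∈ T.toFinset, List.count k T = T.length := by
      simpa [Multiset.coe_count] using this
    calc ∑ k ∈ T.toFinset, (List.count k T : Int)
        = ((∑ k ∈ T.toFinset, List.count k T : ℕ) : Int) := by push_cast; rfl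
      _ = (T.length : Int) := by rw [h2]
  have hinter : ∑ k ∈ T.toFinset, min (List.count k T : Int) (List.count k W : Int)
      = interM T W := by
    unfold interM
    set M := (T : Multiset Char) ∩ (W : Multiset Char) with hM
    have hcard := Multiset.toFinset_sum_count_eq (s := M)
    have hsubset : M.toFinset ⊆ T.toFinset := by
      intro k hk
      simp only [Multiset.mem_toFinset, hM, Multiset.mem_inter] at hk
      simpa [List.mem_toFinset] using hk.1
    have hext : ∑ k ∈ T.toFinset, M.count k = ∑ k ∈ M.toFinset, M.count k := by
      refine (Finset.sum_subset hsubset ?_).symm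
      intro k _ hk
      exact Multiset.count_eq_zero.mpr (by simpa [Multiset.mem_toFinset] using hk)
    have hmin : ∀ k, (M.count k : Int) = min (List.count k T : Int) (List.count k W : Int) := by
      intro k
      rw [hM, Multiset.count_inter]
      push_cast [Multiset.coe_count]
      rfl
    calc ∑ k ∈ T.toFinset, min (List.count k T : Int) (List.count k W : Int)
        = ∑ k ∈ T.toFinset, (M.count k : Int) := by
          exact Finset.sum_congr rfl (fun k _ => (hmin k).symm)
      _ = ((∑ k ∈ T.toFinset, M.count k : ℕ) : Int) := by push_cast; rfl
      _ = (M.card : Int) := by rw [hext, hcard]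
  rw [hlen, hinter]

-- isSimilar T W tests exactly: len T - |T ∩ W| ≤ 1
lemma isSimilar_char (a b : String) :
    isSimilar a b = if (a.toList.length : Int) - interM a.toList b.toList ≤ 1 then 1 else 0 := by
  unfold isSimilar
  simp only []
  rw [show (PySem.Dict.mk [] : PySem.Dict Char Int) = PySem.Dict.empty from rfl,
    PySem.Dict.foldl_insert_getD_add_one_eq_counter,
    show (fun (d : PySem.Dict Char Int) (c : Char) =>
      let d := d.setdefault c 0
      if d.getD c 0 > 0 then d.insert c (d.getD c 0 - 1) else d) = decStep from rfl,
    simSum a.toList b.toList, sum_max_eq a.toList b.toList]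
  have hle := interM_le_left a.toList b.toList
  split_ifs <;> omega

-- counts/intersection are invariant under sorting (a permutation)
lemma coe_sorted (X : List Char) :
    ((PySem.List.sorted X (fun c => c) false : List Char) : Multiset Char)
      = (X : Multiset Char) :=
  Multiset.coe_eq_coe.mpr (PySem.List.sorted_perm X (fun c => c) false)

lemma sorted_sorted_le (X : List Char) :
    (PySem.List.sorted X (fun c => c) false).Pairwise (· ≤ ·) := by
  have := PySem.List.sorted_pairwise X (fun c => c)
  exact this

lemma length_sorted_chars (X : List Char) :
    (PySem.List.sorted X (fun c => c) false).length = X.length := by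
  exact (PySem.List.sorted_perm X (fun c => c) false).length_eq

-- ===== VERDICT (by name: the statement is the Claim_ definition above) =====
theorem solution_spec : Claim_equal_solution := by
  intro n words _ _
  unfold Spec_solution solution solution_alt
  cases hp : PySem.List.pop? words 0 with
  | none => rfl
  | some p =>
    obtain ⟨target, rest⟩ := p
    simp only []
    have hfun : (fun (answer : Int) (word : String) =>
        if PySem.Str.len word = PySem.Str.len target then answer + isSimilar target word
        else if PySem.Str.len word = PySem.Str.len target - 1 then answer + isSimilar target word
        else if PySem.Str.len word = PySem.Str.len target + 1 then answer + isSimilar word target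
        else answer)
        = (fun (total : Int) (word : String) =>
        if |PySem.Str.len word
            - ((PySem.List.sorted target.toList (fun c => c) false).length : Int)| ≤ 1 then
          if max ((PySem.List.sorted target.toList (fun c => c) false).length : Int)
                ((PySem.List.sorted word.toList (fun c => c) false).length : Int)
              - merge2 (PySem.List.sorted target.toList (fun c => c) false)
                  (PySem.List.sorted word.toList (fun c => c) false) ≤ 1
          then total + 1 else total
        else total) := by
      funext ans w
      have hlenT : ((PySem.List.sorted target.toList (fun c => c) false).length : Int)
          = PySem.Str.len target := by
        rw [length_sorted_chars]; rfl
      have hlenW : ((PySem.List.sorted w.toList (fun c => c) false).length : Int)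
          = PySem.Str.len w := by
        rw [length_sorted_chars]; rfl
      have hmerge : merge2 (PySem.List.sorted target.toList (fun c => c) false)
            (PySem.List.sorted w.toList (fun c => c) false)
          = interM target.toList w.toList := by
        rw [merge2_eq_interM _ _ (sorted_sorted_le _) (sorted_sorted_le _)]
        unfold interM
        rw [coe_sorted, coe_sorted]
      rw [hlenT, hlenW, hmerge]
      have hsT : PySem.Str.len target = (target.toList.length : Int) := rfl
      have hsW : PySem.Str.len w = (w.toList.length : Int) := rfl
      have hleT := interM_le_left target.toList w.toList
      have hleW := interM_le_left w.toList target.toList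
      have hcomm := interM_comm target.toList w.toList
      rw [isSimilar_char, isSimilar_char]
      simp only [abs_le, hsT, hsW, max_def]
      split_ifs <;> omega
    rw [hfun]
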